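-- pv_equiv track=rewrite | github.com/joaopedrocosso/OpenCV-Object-Detection | tests/cmd_test.py | identifica_argumentos
-- ===== SOURCE A (Python) =====
-- def identifica_argumentos(args):
--
--     valores_iniciais = []
--     comandos_e_argumentos = dict()
--     comando_anterior = ''
--     for arg in args:
--         if not e_comando(arg):
--             if comando_anterior == '':
--                 valores_iniciais.append(arg)
--             else:
--                 comandos_e_argumentos[comando_anterior].append(arg)
--         else:
--             comandos_e_argumentos[arg] = []
--             comando_anterior = arg
--
--     return valores_iniciais, comandos_e_argumentos
--
-- def e_comando(s):
--     return s.startswith('-')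
-- ===== SOURCE B (Python) =====
-- def identifica_argumentos(args):
--     n = len(args)
--     i = 0
--     while i < n and not e_comando(args[i]):
--         i += 1
--     valores_iniciais = args[:i]
--     comandos_e_argumentos = {}
--     while i < n:
--         cmd = args[i]
--         i += 1
--         j = i
--         while j < n and not e_comando(args[j]):
--             j += 1
--         comandos_e_argumentos[cmd] = args[i:j]
--         i = j
--     return valores_iniciais, comandos_e_argumentos
--
-- def e_comando(s):
--     return s.startswith('-')
-- ===== Notes on version B (the rewrite author's own statement) =====
-- stated objective: simpler
-- what changed: B scans group-at-a-time: it splits args into the leading run of non-commands and then, for each command, slices off its whole run of following arguments and assigns it to the dict in one step, instead of A's element-at-a-time loop that threads a 'previous command' key and appends through a dict lookup on every element.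
import Mathlib
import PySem

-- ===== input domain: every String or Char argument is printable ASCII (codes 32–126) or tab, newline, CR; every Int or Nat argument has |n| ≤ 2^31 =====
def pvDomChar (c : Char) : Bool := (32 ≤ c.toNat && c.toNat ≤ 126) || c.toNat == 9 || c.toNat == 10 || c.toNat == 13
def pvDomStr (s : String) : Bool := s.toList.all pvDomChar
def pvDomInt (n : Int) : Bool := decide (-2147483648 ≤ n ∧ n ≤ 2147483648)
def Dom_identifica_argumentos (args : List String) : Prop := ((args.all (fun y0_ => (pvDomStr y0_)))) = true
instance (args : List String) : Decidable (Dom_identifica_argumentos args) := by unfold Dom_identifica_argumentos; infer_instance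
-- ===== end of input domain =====

-- B replaces A's element-at-a-time loop (threading a 'previous command' key and appending via a
-- dict lookup) by a group-at-a-time span scan: simpler decomposition, same O(n) cost.


-- ===== PORT A =====
def eComando (s : String) : Bool := PySem.Str.startswith s "-"

-- one iteration of A's for-loop over the state (valores_iniciais, comandos_e_argumentos, comando_anterior);
-- `modify prev []` is exact here: comando_anterior is always a present key when it is non-empty
def stepA (st : List String × PySem.Dict String (List String) × String) (arg : String) :
    List String × PySem.Dict String (List String) × String :=
  let (vals, d, prev) := st
  if !(eComando arg) then
    if prev == "" then (vals ++ [arg], d, prev)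
    else (vals, d.modify prev [] (fun l => l ++ [arg]), prev)
  else (vals, d.insert arg [], arg)

def identifica_argumentos (args : List String) : List String × (List (String × List String)) :=
  let st := args.foldl stepA ([], PySem.Dict.empty, "")
  (st.1, st.2.1.items)

-- ===== PORT B =====
-- B's outer while-loop: rest starts at a command; its group is the run of following non-commands
def buildGroups : List String → PySem.Dict String (List String) → PySem.Dict String (List String)
  | [], d => d
  | c :: rest, d =>
      buildGroups (rest.dropWhile (fun a => !(eComando a)))
        (d.insert c (rest.takeWhile (fun a => !(eComando a))))
termination_by l _ => l.length
decreasing_by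
  exact Nat.lt_succ_of_le (List.length_dropWhile_le _ _)

def identifica_argumentos_alt (args : List String) : List String × (List (String × List String)) :=
  let valores := args.takeWhile (fun a => !(eComando a))
  let rest := args.dropWhile (fun a => !(eComando a))
  (valores, (buildGroups rest PySem.Dict.empty).items)

-- ===== PRECONDITION & SPEC =====
def Spec_identifica_argumentos (args : List String) (out : List String × (List (String × List String))) : Prop := out = identifica_argumentos_alt args
instance (args : List String) (out : List String × (List (String × List String))) : Decidable (Spec_identifica_argumentos args out) := by unfold Spec_identifica_argumentos; infer_instance

-- ===== CLAIM (what is proved, stated in full; the proofs are below) =====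
def Claim_equal_identifica_argumentos : Prop := ∀ (args : List String), Dom_identifica_argumentos args → Spec_identifica_argumentos args (identifica_argumentos args)

-- ===== LEMMAS AND PROOFS =====

theorem eComando_ne_empty {c : String} (h : eComando c = true) : (c == "") = false := by
  rcases eq_or_ne c "" with rfl | hne
  · exact absurd h (by decide)
  · simpa using hne

theorem modify_insert_self {κ ν : Type} [BEq κ] [LawfulBEq κ]
    (d : PySem.Dict κ ν) (k : κ) (v : ν) (dflt : ν) (f : ν → ν) :
    (d.insert k v).modify k dflt f = d.insert k (f v) := by
  unfold PySem.Dict.modify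
  rw [PySem.Dict.getD_insert_self, PySem.Dict.insert_insert_self]

-- A's loop after a command c has been seen (comando_anterior = c, d already holds key c with grp)
theorem phase2 (rest : List String) :
    ∀ (vals : List String) (d : PySem.Dict String (List String)) (c : String)
      (grp : List String), eComando c = true →
    ((rest.foldl stepA (vals, d.insert c grp, c)).1,
     (rest.foldl stepA (vals, d.insert c grp, c)).2.1)
      = (vals, buildGroups (rest.dropWhile (fun a => !(eComando a)))
          (d.insert c (grp ++ rest.takeWhile (fun a => !(eComando a))))) := by
  induction rest with
  | nil => intro vals d c grp hc; simp [buildGroups]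
  | cons a rest ih =>
    intro vals d c grp hc
    by_cases ha : eComando a = true
    · have hstep : stepA (vals, d.insert c grp, c) a = (vals, (d.insert c grp).insert a [], a) := by
        simp [stepA, ha]
      rw [List.foldl_cons, hstep]
      have := ih vals (d.insert c grp) a [] ha
      simp only [List.nil_append] at this
      rw [this]
      simp [List.takeWhile_cons, ha, buildGroups]
    · have ha' : eComando a = false := by simpa using ha
      have hstep : stepA (vals, d.insert c grp, c) a
          = (vals, d.insert c (grp ++ [a]), c) := by
        simp [stepA, ha', eComando_ne_empty hc, modify_insert_self]
      rw [List.foldl_cons, hstep]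
      have := ih vals d c (grp ++ [a]) hc
      rw [this]
      simp [List.dropWhile_cons, ha']
  
-- A's loop while comando_anterior = '' (no command seen yet)
theorem phase1 (args : List String) :
    ∀ (vals : List String) (d : PySem.Dict String (List String)),
    ((args.foldl stepA (vals, d, "")).1, (args.foldl stepA (vals, d, "")).2.1)
      = (vals ++ args.takeWhile (fun a => !(eComando a)),
         buildGroups (args.dropWhile (fun a => !(eComando a))) d) := by
  induction args with
  | nil => intro vals d; simp [buildGroups]
  | cons a rest ih =>
    intro vals d
    by_cases ha : eComando a = true
    · have hstep : stepA (vals, d, "") a = (vals, d.insert a [], a) := by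
        simp [stepA, ha]
      rw [List.foldl_cons, hstep]
      have := phase2 rest vals d a [] ha
      simp only [List.nil_append] at this
      rw [this]
      simp [List.takeWhile_cons, ha, buildGroups]
    · have ha' : eComando a = false := by simpa using ha
      have hstep : stepA (vals, d, "") a = (vals ++ [a], d, "") := by
        simp [stepA, ha']
      rw [List.foldl_cons, hstep, ih (vals ++ [a]) d]
      simp [List.dropWhile_cons, ha']

-- ===== VERDICT (by name: the statement is the Claim_ definition above) =====
theorem identifica_argumentos_spec : Claim_equal_identifica_argumentos := by
  intro args _
  unfold Spec_identifica_argumentos identifica_argumentos identifica_argumentos_alt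
  have h := phase1 args [] PySem.Dict.empty
  have h1 := congrArg Prod.fst h
  have h2 := congrArg Prod.snd h
  simp only at h1 h2
  simp [h1, h2]
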